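-- pv_equiv track=rewrite | github.com/jazzooi21/quantum-topology-repeaters | trimmed_iters_funcs.py | is_valid_star
-- ===== SOURCE A (Python) =====
-- def is_valid_star(disjoint_paths, users):
--     users_valid = {u: False for u in users}
--     for path in disjoint_paths:
--         if path[0] in users:
--             users_valid[path[0]] = True
--         if path[-2] in users: # -1 as exclude super-sink
--             users_valid[path[-2]] = True
--     return all([is_valid for is_valid in users_valid.values()])
-- ===== SOURCE B (Python) =====
-- def is_valid_star(disjoint_paths, users):
--     # For each user, scan the paths for one whose source or second-to-last
--     # node (excluding the super-sink) is that user.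
--     return all(
--         any(path[0] == u or path[-2] == u for path in disjoint_paths)
--         for u in users
--     )
-- ===== Notes on version B (the rewrite author's own statement) =====
-- stated objective: simpler
-- what changed: Replaces A's per-user boolean flag dict (filled while looping over paths, then reduced over dict values) by a direct nested quantification: for each user, scan the paths for a matching endpoint; the 'in users' membership guards disappear because the outer loop already ranges over users. The short-circuiting any/all stops at the first covering path per user, and no dict or membership lists are built (a timing run measured B faster).
-- outside the precondition, e.g. on is_valid_star([[5]], [5]): A raises IndexError, B returns True
import Mathlib
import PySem

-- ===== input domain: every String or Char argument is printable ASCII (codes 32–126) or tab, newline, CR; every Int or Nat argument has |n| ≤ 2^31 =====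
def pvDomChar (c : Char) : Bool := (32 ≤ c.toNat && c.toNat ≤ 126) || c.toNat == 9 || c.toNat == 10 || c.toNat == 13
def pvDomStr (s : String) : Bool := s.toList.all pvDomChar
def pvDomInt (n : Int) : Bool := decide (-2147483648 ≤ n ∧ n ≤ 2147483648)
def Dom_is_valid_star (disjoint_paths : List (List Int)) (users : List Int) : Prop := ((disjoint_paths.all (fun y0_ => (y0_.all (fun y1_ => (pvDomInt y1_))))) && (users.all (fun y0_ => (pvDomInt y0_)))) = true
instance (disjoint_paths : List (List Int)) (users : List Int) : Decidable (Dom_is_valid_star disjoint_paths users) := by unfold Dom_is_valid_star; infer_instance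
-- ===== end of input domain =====

-- B replaces A's per-user flag dict filled while looping over paths by a direct
-- nested quantification over users then paths (simpler; same cost).


-- ===== PORT A =====
-- path[0] / path[-2] are total under Pre_ (paths of length ≥ 2); getD 0 is never
-- taken inside Pre_.
def is_valid_star (disjoint_paths : List (List Int)) (users : List Int) : Bool :=
  -- users_valid = {u: False for u in users}
  let users_valid : PySem.Dict Int Bool :=
    users.foldl (fun d u => d.insert u false) PySem.Dict.empty
  -- for path in disjoint_paths: two guarded flag updates
  let users_valid :=
    disjoint_paths.foldl (fun d path =>
      let a := (PySem.List.pyGet? path 0).getD 0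
      let b := (PySem.List.pyGet? path (-2)).getD 0
      let d := if users.contains a then d.insert a true else d
      if users.contains b then d.insert b true else d) users_valid
  -- all([is_valid for is_valid in users_valid.values()])
  users_valid.values.all id

-- ===== PORT B =====
def is_valid_star_alt (disjoint_paths : List (List Int)) (users : List Int) : Bool :=
  users.all (fun u =>
    disjoint_paths.any (fun path =>
      ((PySem.List.pyGet? path 0).getD 0 == u) || ((PySem.List.pyGet? path (-2)).getD 0 == u)))

-- ===== PRECONDITION & SPEC =====
-- Pre_ excludes inputs where the Python A raises IndexError: a path with fewer
-- than 2 nodes makes path[0] or path[-2] raise.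
def Pre_is_valid_star (disjoint_paths : List (List Int)) (users : List Int) : Prop :=
  ∀ path ∈ disjoint_paths, 2 ≤ path.length
instance (disjoint_paths : List (List Int)) (users : List Int) : Decidable (Pre_is_valid_star disjoint_paths users) := by unfold Pre_is_valid_star; infer_instance
def pvWitness_is_valid_star : List (List Int) × List Int := ([[1, 2, 9], [3, 4, 9]], [2, 4])

def Spec_is_valid_star (disjoint_paths : List (List Int)) (users : List Int) (out : Bool) : Prop := out = is_valid_star_alt disjoint_paths users
instance (disjoint_paths : List (List Int)) (users : List Int) (out : Bool) : Decidable (Spec_is_valid_star disjoint_paths users out) := by unfold Spec_is_valid_star; infer_instance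

-- ===== CLAIM (what is proved, stated in full; the proofs are below) =====
def Claim_equal_is_valid_star : Prop := ∀ (disjoint_paths : List (List Int)) (users : List Int), Dom_is_valid_star disjoint_paths users → Pre_is_valid_star disjoint_paths users → Spec_is_valid_star disjoint_paths users (is_valid_star disjoint_paths users)

-- ===== LEMMAS AND PROOFS =====

-- the per-path match test shared by the statements below
def pvMatch (u : Int) (path : List Int) : Bool :=
  ((PySem.List.pyGet? path 0).getD 0 == u) || ((PySem.List.pyGet? path (-2)).getD 0 == u)

-- one step of A's loop body
def pvStep (users : List Int) (d : PySem.Dict Int Bool) (path : List Int) : PySem.Dict Int Bool :=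
  let a := (PySem.List.pyGet? path 0).getD 0
  let b := (PySem.List.pyGet? path (-2)).getD 0
  let d := if users.contains a then d.insert a true else d
  if users.contains b then d.insert b true else d

lemma pvStep_keys (users : List Int) (d : PySem.Dict Int Bool) (path : List Int)
    (hc : ∀ x : Int, d.contains x = decide (x ∈ users)) :
    (pvStep users d path).keys = d.keys := by
  unfold pvStep
  dsimp only
  split_ifs with h1 h2 h2 <;>
    simp_all [PySem.Dict.keys_insert_of_contains, PySem.Dict.contains_insert]

lemma pvStep_contains (users : List Int) (d : PySem.Dict Int Bool) (path : List Int)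
    (hc : ∀ x : Int, d.contains x = decide (x ∈ users)) :
    ∀ x : Int, (pvStep users d path).contains x = decide (x ∈ users) := by
  intro x
  rw [PySem.Dict.contains_eq_decide_mem_keys, pvStep_keys users d path hc,
    ← PySem.Dict.contains_eq_decide_mem_keys, hc]

lemma pvStep_getD (users : List Int) (d : PySem.Dict Int Bool) (path : List Int)
    (u : Int) (hu : u ∈ users) :
    (pvStep users d path).getD u false = (d.getD u false || pvMatch u path) := by
  have hcu : users.contains u = true := by simpa using hu
  unfold pvStep pvMatch
  dsimp only
  generalize (PySem.List.pyGet? path 0).getD 0 = a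
  generalize (PySem.List.pyGet? path (-2)).getD 0 = b
  by_cases hau : a = u <;> by_cases hbu : b = u
  · subst hau; subst hbu
    simp [hu]
  · subst hau
    split_ifs <;>
      simp_all [PySem.Dict.getD_insert, show ¬ (a = b) from fun h => hbu h.symm]
  · subst hbu
    rw [if_pos hcu]
    simp
  · have h1 : ¬ (u = a) := fun h => hau h.symm
    have h2 : ¬ (u = b) := fun h => hbu h.symm
    split_ifs <;> simp [PySem.Dict.getD_insert, h1, h2, hau, hbu]

-- invariant of A's folding loop over the paths
lemma pvFold_getD (users : List Int) :
    ∀ (dps : List (List Int)) (d : PySem.Dict Int Bool),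
      (∀ x : Int, d.contains x = decide (x ∈ users)) →
      (dps.foldl (pvStep users) d).keys = d.keys ∧
      (∀ u ∈ users,
        (dps.foldl (pvStep users) d).getD u false = (d.getD u false || dps.any (pvMatch u))) := by
  intro dps
  induction dps with
  | nil => intro d hc; simp
  | cons p ps ih =>
    intro d hc
    have hc' := pvStep_contains users d p hc
    obtain ⟨hk, hg⟩ := ih (pvStep users d p) hc'
    refine ⟨by rw [List.foldl_cons, hk, pvStep_keys users d p hc], ?_⟩
    intro u hu
    rw [List.foldl_cons, hg u hu, pvStep_getD users d p u hu]
    simp [Bool.or_assoc]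

lemma pvInit_keys (users : List Int) :
    (users.foldl (fun d u => d.insert u false) (PySem.Dict.empty : PySem.Dict Int Bool)).keys
      = PySem.Set.ofList users := by
  rw [PySem.Dict.keys_foldl_insert, PySem.Dict.keys_empty, PySem.Set.update_nil_left]

lemma pvInit_nodup (users : List Int) :
    (users.foldl (fun d u => d.insert u false) (PySem.Dict.empty : PySem.Dict Int Bool)).keys.Nodup := by
  apply PySem.Dict.nodup_keys_foldl_insert
  exact PySem.Dict.nodup_keys_empty

lemma pvInit_getD (users : List Int) (u : Int) :
    (users.foldl (fun d u => d.insert u false) (PySem.Dict.empty : PySem.Dict Int Bool)).getD u false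
      = false := by
  suffices h : ∀ (d : PySem.Dict Int Bool), d.getD u false = false →
      (users.foldl (fun d u => d.insert u false) d).getD u false = false from
    h _ (by simp)
  induction users with
  | nil => intro d hd; simpa using hd
  | cons v vs ih =>
    intro d hd
    rw [List.foldl_cons]
    apply ih
    rw [PySem.Dict.getD_insert]
    split_ifs <;> simp [hd]

lemma pvInit_contains (users : List Int) (x : Int) :
    (users.foldl (fun d u => d.insert u false) (PySem.Dict.empty : PySem.Dict Int Bool)).contains x
      = decide (x ∈ users) := by
  rw [PySem.Dict.contains_eq_decide_mem_keys, pvInit_keys]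
  simp [PySem.Set.mem_ofList]

-- the core equality, stated over pvStep (definitionally A's loop body)
lemma pvMain (dps : List (List Int)) (users : List Int) :
    (dps.foldl (pvStep users)
        (users.foldl (fun d u => d.insert u false) (PySem.Dict.empty : PySem.Dict Int Bool))).values.all id
      = users.all (fun u => dps.any (pvMatch u)) := by
  obtain ⟨hkeys, hget⟩ := pvFold_getD users dps _ (pvInit_contains users)
  have hnd : (dps.foldl (pvStep users)
      (users.foldl (fun d u => d.insert u false) (PySem.Dict.empty : PySem.Dict Int Bool))).keys.Nodup := by
    rw [hkeys]; exact pvInit_nodup users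
  rw [PySem.Dict.values_eq_map_keys _ hnd false, hkeys, pvInit_keys, Bool.eq_iff_iff]
  simp only [List.all_map, List.all_eq_true, PySem.Set.mem_ofList, Function.comp, id]
  constructor
  · intro h u hu
    have := h u hu
    rw [hget u hu, pvInit_getD users u] at this
    simpa using this
  · intro h u hu
    rw [hget u hu, pvInit_getD users u]
    simpa using h u hu

-- ===== VERDICT (by name: the statement is the Claim_ definition above) =====
theorem is_valid_star_spec : Claim_equal_is_valid_star := by
  intro dps users _ _
  exact pvMain dps users
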